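-- pv_equiv track=rewrite | github.com/99als/Python | Project 0/Project0-Q2.py | unique_long_words
-- ===== SOURCE A (Python) =====
-- def unique_long_words(wlist, wlen):
--     count = 0
--     uniqueList = []
--     for word in wlist:
--         if len(word) >= wlen and word not in uniqueList:
--             count += 1
--             uniqueList.append(word)
--     return count
-- ===== SOURCE B (Python) =====
-- def unique_long_words(wlist, wlen):
--     qual = sorted(w for w in wlist if len(w) >= wlen)
--     count = 0
--     prev = None
--     for w in qual:
--         if prev is None or w != prev:
--             count += 1
--         prev = w
--     return count
-- ===== Notes on version B (the rewrite author's own statement) =====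
-- stated objective: alternative
-- what changed: Counts distinct qualifying words by sorting the filtered list once and counting boundaries between adjacent unequal words, instead of a linear membership scan of a growing uniqueList per word.
import Mathlib
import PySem

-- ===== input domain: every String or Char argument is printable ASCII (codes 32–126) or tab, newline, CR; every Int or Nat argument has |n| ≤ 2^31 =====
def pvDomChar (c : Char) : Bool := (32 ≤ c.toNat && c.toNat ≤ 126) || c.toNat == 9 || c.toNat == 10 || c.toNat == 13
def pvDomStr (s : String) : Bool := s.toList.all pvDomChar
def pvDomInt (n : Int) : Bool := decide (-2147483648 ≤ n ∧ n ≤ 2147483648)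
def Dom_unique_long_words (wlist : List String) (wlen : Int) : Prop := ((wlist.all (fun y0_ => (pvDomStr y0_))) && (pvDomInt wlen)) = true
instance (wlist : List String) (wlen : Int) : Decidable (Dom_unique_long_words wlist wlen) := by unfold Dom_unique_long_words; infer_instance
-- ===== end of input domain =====

-- B replaces A's per-word linear membership scan of a growing uniqueList with
-- sort-the-qualifying-words-once, then a single pass counting adjacent boundaries.

-- ===== PORT A =====
-- literal port of A: fold over wlist carrying (count, uniqueList)
def unique_long_words (wlist : List String) (wlen : Int) : Int :=
  (wlist.foldl
    (fun (st : Int × List String) word =>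
      if wlen ≤ PySem.Str.len word ∧ word ∉ st.2
      then (st.1 + 1, st.2 ++ [word])
      else st)
    (0, [])).1

-- ===== PORT B =====
-- literal port of Source B: sort the filtered list, then fold carrying (count, prev : Option String)
def unique_long_words_alt (wlist : List String) (wlen : Int) : Int :=
  let qual := PySem.List.sorted (wlist.filter (fun w => decide (wlen ≤ PySem.Str.len w))) (fun x => x) false
  (qual.foldl
    (fun (st : Int × Option String) w =>
      (if st.2 = none ∨ st.2 ≠ some w then st.1 + 1 else st.1, some w))
    (0, none)).1

-- ===== PRECONDITION & SPEC =====
def Spec_unique_long_words (wlist : List String) (wlen : Int) (out : Int) : Prop := out = unique_long_words_alt wlist wlen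
instance (wlist : List String) (wlen : Int) (out : Int) : Decidable (Spec_unique_long_words wlist wlen out) := by unfold Spec_unique_long_words; infer_instance

-- ===== CLAIM (what is proved, stated in full; the proofs are below) =====
def Claim_equal_unique_long_words : Prop := ∀ (wlist : List String) (wlen : Int), Dom_unique_long_words wlist wlen → Spec_unique_long_words wlist wlen (unique_long_words wlist wlen)

-- ===== LEMMAS AND PROOFS =====

-- card (insert w X) = card (X.erase w) + 1, with no membership side condition
theorem pv_card_insert {α : Type} [DecidableEq α] (w : α) (X : Finset α) :
    (insert w X).card = (X.erase w).card + 1 := by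
  have h : insert w X = insert w (X.erase w) := by
    ext x; by_cases hx : x = w <;> simp [hx]
  rw [h, Finset.card_insert_of_notMem (Finset.notMem_erase _ _)]

theorem pv_sdiff_singleton {α : Type} [DecidableEq α] (X : Finset α) (w : α) :
    X \ {w} = X.erase w := by
  ext x; simp [and_comm]

-- A's loop: final count = starting count + number of distinct qualifying words not already in uniqueList
theorem pv_loopA (wlen : Int) :
    ∀ (ws : List String) (c : Int) (ul : List String),
      (ws.foldl
        (fun (st : Int × List String) word =>
          if wlen ≤ PySem.Str.len word ∧ word ∉ st.2
          then (st.1 + 1, st.2 ++ [word])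
          else st)
        (c, ul)).1
      = c + (((ws.filter (fun w => decide (wlen ≤ PySem.Str.len w))).toFinset \ ul.toFinset).card : Int) := by
  intro ws
  induction ws with
  | nil => intro c ul; simp
  | cons w rest ih =>
    intro c ul
    simp only [List.foldl_cons, List.filter_cons]
    by_cases hq : wlen ≤ PySem.Str.len w
    · by_cases hm : w ∈ ul
      · rw [if_neg (show ¬(wlen ≤ PySem.Str.len w ∧ w ∉ ul) from fun h => h.2 hm)]
        rw [if_pos (by simpa using hq)]
        rw [ih]
        congr 2
        simp only [List.toFinset_cons]
        rw [Finset.insert_sdiff_of_mem _ (by simpa using hm)]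
      · rw [if_pos (show wlen ≤ PySem.Str.len w ∧ w ∉ ul from ⟨hq, hm⟩)]
        rw [if_pos (by simpa using hq)]
        rw [ih]
        simp only [List.toFinset_cons, List.toFinset_append, List.toFinset_cons,
          List.toFinset_nil, insert_empty_eq]
        set S := (rest.filter (fun w => decide (wlen ≤ PySem.Str.len w))).toFinset with hS
        have h1 : insert w S \ ul.toFinset = insert w (S \ ul.toFinset) :=
          Finset.insert_sdiff_of_notMem _ (by simpa using hm)
        have h2 : S \ (ul.toFinset ∪ {w}) = (S \ ul.toFinset).erase w := by
          ext x; simp; tauto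
        rw [h1, h2, pv_card_insert]
        push_cast
        ring
    · rw [if_neg (show ¬(wlen ≤ PySem.Str.len w ∧ w ∉ ul) from fun h => hq h.1)]
      rw [if_neg (by simpa using hq)]
      exact ih c ul

-- B's loop after the first element: sorted tail, prev already counted; counts the distinct elements other than prev
theorem pv_loopB :
    ∀ (t : List String) (c : Int) (prev : String),
      t.Pairwise (· ≤ ·) → (∀ x ∈ t, prev ≤ x) →
      (t.foldl
        (fun (st : Int × Option String) w =>
          (if st.2 = none ∨ st.2 ≠ some w then st.1 + 1 else st.1, some w))
        (c, some prev)).1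
      = c + ((t.toFinset \ {prev}).card : Int) := by
  intro t
  induction t with
  | nil => intro c prev _ _; simp
  | cons b t' ih =>
    intro c prev hp hge
    have hp' : t'.Pairwise (· ≤ ·) := hp.of_cons
    have hbt' : ∀ x ∈ t', b ≤ x := fun x hx => (List.pairwise_cons.mp hp).1 x hx
    simp only [List.foldl_cons]
    by_cases hb : b = prev
    · subst hb
      rw [if_neg (show ¬((some b : Option String) = none ∨ some b ≠ some b) by simp)]
      rw [ih c b hp' hbt']
      congr 2
      simp only [List.toFinset_cons]
      rw [Finset.insert_sdiff_of_mem _ (by simp)]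
    · have hlt : prev < b := lt_of_le_of_ne (hge b (by simp)) (Ne.symm hb)
      rw [if_pos (show (some prev : Option String) = none ∨ some prev ≠ some b from
        Or.inr (fun h => hb (Option.some_inj.mp h).symm))]
      rw [ih (c + 1) b hp' hbt']
      have hnot : prev ∉ insert b t'.toFinset := by
        simp only [Finset.mem_insert, List.mem_toFinset]
        rintro (h | h)
        · exact absurd h.symm (ne_of_gt hlt)
        · exact absurd rfl (ne_of_gt (lt_of_lt_of_le hlt (hbt' _ h))).symm
      have h1 : (b :: t').toFinset \ {prev} = insert b t'.toFinset := by
        simp only [List.toFinset_cons]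
        rw [Finset.sdiff_eq_self_of_disjoint (by simpa using hnot)]
      rw [h1, pv_sdiff_singleton, pv_card_insert]
      push_cast
      ring

-- B equals the distinct count of the qualifying words
theorem pv_B_card (wlist : List String) (wlen : Int) :
    unique_long_words_alt wlist wlen
      = ((wlist.filter (fun w => decide (wlen ≤ PySem.Str.len w))).toFinset.card : Int) := by
  unfold unique_long_words_alt
  set fl := wlist.filter (fun w => decide (wlen ≤ PySem.Str.len w)) with hfl
  have hperm : (PySem.List.sorted fl (fun x => x) false).Perm fl := PySem.List.sorted_perm ..
  have hfs : (PySem.List.sorted fl (fun x => x) false).toFinset = fl.toFinset := by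
    ext x; simp only [List.mem_toFinset]; exact hperm.mem_iff
  have hpw : (PySem.List.sorted fl (fun x => x) false).Pairwise (· ≤ ·) := by
    have := PySem.List.sorted_pairwise fl (fun x => x)
    simpa using this
  rcases hs : PySem.List.sorted fl (fun x => x) false with _ | ⟨a, t⟩
  · simp [← hfs, hs]
  · rw [hs] at hpw hfs
    simp only [List.foldl_cons]
    rw [if_pos (Or.inl trivial)]
    rw [pv_loopB t (0 + 1) a hpw.of_cons (fun x hx => (List.pairwise_cons.mp hpw).1 x hx)]
    rw [← hfs]
    simp only [List.toFinset_cons]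
    rw [pv_sdiff_singleton, pv_card_insert]
    push_cast
    ring

-- ===== VERDICT (by name: the statement is the Claim_ definition above) =====
theorem unique_long_words_spec : Claim_equal_unique_long_words := by
  intro wlist wlen _
  unfold Spec_unique_long_words
  rw [pv_B_card]
  unfold unique_long_words
  rw [pv_loopA wlen wlist 0 []]
  simp
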